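-- pv_equiv track=rewrite | github.com/Arsen1302/Code-copy-detector | TestData/solutions/problem_1374_1.py | solution_1374_1
-- ===== SOURCE A (Python) =====
-- from typing import List
--
-- def solution_1374_1(operations: List[str]) -> int:
--     x = 0
--     for o in operations:
--         if '+' in o:
--             x += 1
--         else:
--             x -= 1
--     return x
-- ===== SOURCE B (Python) =====
-- from typing import List
--
-- def solution_1374_1(operations: List[str]) -> int:
--     # Divide and conquer: split the list in half, solve each half, add.
--     if not operations:
--         return 0
--     if len(operations) == 1:
--         return 1 if '+' in operations[0] else -1
--     mid = len(operations) // 2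
--     return solution_1374_1(operations[:mid]) + solution_1374_1(operations[mid:])
-- ===== Notes on version B (the rewrite author's own statement) =====
-- stated objective: alternative
-- what changed: B replaces A's linear accumulator loop by a recursive divide-and-conquer: it splits the list in half, solves each half independently, and adds the two results (correct because the net value is a sum of independent per-element contributions).
import Mathlib
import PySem

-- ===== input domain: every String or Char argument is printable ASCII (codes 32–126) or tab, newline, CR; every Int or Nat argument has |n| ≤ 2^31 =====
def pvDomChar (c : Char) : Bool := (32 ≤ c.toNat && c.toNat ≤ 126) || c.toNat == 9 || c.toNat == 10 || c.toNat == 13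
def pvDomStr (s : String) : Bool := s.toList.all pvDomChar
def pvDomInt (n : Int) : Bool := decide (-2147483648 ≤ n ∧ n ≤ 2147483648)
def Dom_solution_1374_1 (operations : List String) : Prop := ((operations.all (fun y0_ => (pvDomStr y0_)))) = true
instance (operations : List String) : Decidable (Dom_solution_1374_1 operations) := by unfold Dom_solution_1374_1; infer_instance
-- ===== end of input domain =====

-- ===== PORT A =====
-- A: running counter, +1 if '+' in o else -1
def solution_1374_1 (operations : List String) : Int :=
  operations.foldl (fun x o => if PySem.Str.isIn "+" o then x + 1 else x - 1) 0

-- ===== PORT B =====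
-- B: divide and conquer — split in half, solve each half, add
def solution_1374_1_alt (operations : List String) : Int :=
  match operations with
  | [] => 0
  | [o] => if PySem.Str.isIn "+" o then 1 else -1
  | o₁ :: o₂ :: rest =>
    let ops := o₁ :: o₂ :: rest
    let mid : Int := (ops.length : Int) / 2
    solution_1374_1_alt (PySem.List.slice ops none (some mid)) +
    solution_1374_1_alt (PySem.List.slice ops (some mid) none)
termination_by operations.length
decreasing_by
  · have h0 : (0:Int) ≤ ((o₁ :: o₂ :: rest).length : Int) / 2 := by positivity
    rw [PySem.List.slice_to _ h0]
    simp [List.length_take]; omega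
  · have h0 : (0:Int) ≤ ((o₁ :: o₂ :: rest).length : Int) / 2 := by positivity
    rw [PySem.List.slice_from _ h0]
    simp [List.length_drop]
    omega

-- ===== PRECONDITION & SPEC =====
def Spec_solution_1374_1 (operations : List String) (out : Int) : Prop := out = solution_1374_1_alt operations
instance (operations : List String) (out : Int) : Decidable (Spec_solution_1374_1 operations out) := by unfold Spec_solution_1374_1; infer_instance

-- ===== CLAIM (what is proved, stated in full; the proofs are below) =====
def Claim_equal_solution_1374_1 : Prop := ∀ (operations : List String), Dom_solution_1374_1 operations → Spec_solution_1374_1 operations (solution_1374_1 operations)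

-- ===== LEMMAS AND PROOFS =====

-- ===== VERDICT (by name: the statement is the Claim_ definition above) =====
-- A's fold from any start equals start plus the sum of per-element ±1 contributions
lemma fold_eq (l : List String) (x : Int) :
    l.foldl (fun x o => if PySem.Str.isIn "+" o then x + 1 else x - 1) x
      = x + (l.map (fun o => if PySem.Str.isIn "+" o then (1 : Int) else -1)).sum := by
  induction l generalizing x with
  | nil => simp
  | cons h t ih =>
    simp only [List.foldl_cons, List.map_cons, List.sum_cons, ih]
    split_ifs <;> ring

-- B's divide-and-conquer computes the same sum of per-element contributions
lemma alt_eq_sum (l : List String) :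
    solution_1374_1_alt l
      = (l.map (fun o => if PySem.Str.isIn "+" o then (1 : Int) else -1)).sum := by
  fun_induction solution_1374_1_alt l with
  | case1 => simp
  | case2 o h => simp [PySem.Str.isIn, PySem.Chars.isIn] at h ⊢; exact h
  | case3 o h => simp [PySem.Str.isIn, PySem.Chars.isIn] at h ⊢; exact h
  | case4 o₁ o₂ rest ops mid ih1 ih2 =>
    have h0 : (0:Int) ≤ ((o₁ :: o₂ :: rest).length : Int) / 2 := by positivity
    simp only [ops, mid] at *
    simp only [PySem.List.slice_to _ h0, PySem.List.slice_from _ h0] at ih1 ih2 ⊢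
    rw [ih1, ih2, ← List.sum_append, ← List.map_append, List.take_append_drop]

-- ===== VERDICT =====
theorem solution_1374_1_spec : Claim_equal_solution_1374_1 := by
  intro ops _
  unfold Spec_solution_1374_1 solution_1374_1
  rw [fold_eq, alt_eq_sum]
  ring
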